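-- pv_equiv track=rewrite | github.com/billzorn/msp-pymodel | lib/utils.py | interesting_regions
-- ===== SOURCE A (Python) =====
-- def boring_region(fill, align):
--     region = fill * (align // len(fill))
--     if len(region) < align:
--         region += fill
--     if len(region) > align:
--         region = region[:align]
--     return region
--
-- def interesting_regions(mem, addr, fill = [0x0], align = 8):
--     boring = boring_region(fill, align)
--     regions = []
--
--     start_idx = 0
--     for idx in range(0, len(mem), align):
--         if mem[idx:idx+align] == boring:
--             if start_idx < idx:
--                regions.append((addr + start_idx, mem[start_idx:idx]))
--             start_idx = idx + align
--     if start_idx < len(mem):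
--         regions.append((addr + start_idx, mem[start_idx:]))
--     return regions
-- ===== SOURCE B (Python) =====
-- def interesting_regions(mem, addr, fill = [0x0], align = 8):
--     # precompute one boring-chunk pattern, then per-chunk flags, then split the
--     # flag list into maximal non-boring runs and emit one region per run
--     boring = (fill * (align // len(fill) + 1))[:align]
--     flags = [mem[k:k + align] == boring for k in range(0, len(mem), align)]
--     regions = []
--     i = 0
--     while i < len(flags):
--         if flags[i]:
--             i += 1
--         else:
--             j = i + 1
--             while j < len(flags) and not flags[j]:
--                 j += 1
--             regions.append((addr + i * align, mem[i * align : j * align]))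
--             i = j
--     return regions
-- ===== Notes on version B (the rewrite author's own statement) =====
-- stated objective: alternative
-- what changed: B precomputes a boolean flag per aligned chunk and then splits the flag list into maximal non-boring runs (inner while over each run), instead of A's single pass that threads a pending start_idx through the loop; B also builds the boring pattern by one truncation (fill*align)[:align] instead of A's quotient/pad/truncate steps.
-- outside the precondition, e.g. on interesting_regions([1, 2], 5, [0], -3): A returns [(5, [1, 2])], B returns []
import Mathlib
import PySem

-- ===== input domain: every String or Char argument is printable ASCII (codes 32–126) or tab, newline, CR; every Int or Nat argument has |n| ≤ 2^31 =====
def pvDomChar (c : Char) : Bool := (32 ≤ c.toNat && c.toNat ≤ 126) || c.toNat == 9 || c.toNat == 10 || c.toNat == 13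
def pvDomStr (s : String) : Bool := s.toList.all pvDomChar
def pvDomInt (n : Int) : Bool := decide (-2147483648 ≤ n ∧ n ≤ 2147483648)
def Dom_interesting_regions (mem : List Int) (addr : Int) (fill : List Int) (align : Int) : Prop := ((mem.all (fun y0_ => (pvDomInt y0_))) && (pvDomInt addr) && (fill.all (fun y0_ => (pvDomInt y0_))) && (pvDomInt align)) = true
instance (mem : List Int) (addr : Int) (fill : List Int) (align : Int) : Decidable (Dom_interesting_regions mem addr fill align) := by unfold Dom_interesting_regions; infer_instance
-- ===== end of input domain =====

-- B replaces A's single pass threading a pending start_idx by: per-chunk boring flags computed once,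
-- then splitting the flag list into maximal non-boring runs, one region per run (alternative decomposition, same cost).

-- Python 'lst * k' (list repetition; k ≤ 0 gives []): shared primitive of both ports
def pyListMul (l : List Int) (k : Int) : List Int := (List.replicate k.toNat l).flatten

-- ===== PORT A =====
def boring_region (fill : List Int) (align : Int) : List Int :=
  let region := pyListMul fill (PySem.Int.floordiv align (fill.length : Int))
  let region := if (region.length : Int) < align then region ++ fill else region
  if (region.length : Int) > align then PySem.List.slice region none (some align) else region

def interesting_regions (mem : List Int) (addr : Int) (fill : List Int) (align : Int) : List (Int × List Int) :=
  let boring := boring_region fill align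
  let st := (PySem.List.pyRange 0 (mem.length : Int) align).foldl
      (fun (st : Int × List (Int × List Int)) idx =>
        if PySem.List.slice mem (some idx) (some (idx + align)) = boring then
          (idx + align,
           if st.1 < idx then st.2 ++ [(addr + st.1, PySem.List.slice mem (some st.1) (some idx))] else st.2)
        else st)
      (0, [])
  if st.1 < (mem.length : Int) then st.2 ++ [(addr + st.1, PySem.List.slice mem (some st.1) none)] else st.2

-- ===== PORT B =====
-- the two while loops of Source B: outer loop = structural recursion on the flag list carrying the
-- chunk index i; the inner 'advance j while not flags[j]' is the leading false-run (takeWhile)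
def irScan (mem : List Int) (addr : Int) (align : Int) : List Bool → Int → List (Int × List Int)
  | [], _ => []
  | true :: rest, i => irScan mem addr align rest (i + 1)
  | false :: rest, i =>
      let run := rest.takeWhile (· = false)
      let j := i + 1 + (run.length : Int)
      (addr + i * align, PySem.List.slice mem (some (i * align)) (some (j * align)))
        :: irScan mem addr align (rest.drop run.length) j
  termination_by fl _ => fl.length
  decreasing_by
    all_goals simp

def interesting_regions_alt (mem : List Int) (addr : Int) (fill : List Int) (align : Int) : List (Int × List Int) :=
  let boring := PySem.List.slice (pyListMul fill (PySem.Int.floordiv align (fill.length : Int) + 1)) none (some align)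
  let flags := (PySem.List.pyRange 0 (mem.length : Int) align).map
      (fun k => decide (PySem.List.slice mem (some k) (some (k + align)) = boring))
  irScan mem addr align flags 0

-- ===== PRECONDITION & SPEC =====
-- Pre_ keeps the natural domain: a nonempty fill pattern and a positive alignment.  fill = [] and
-- align = 0 make A raise (ZeroDivisionError / ValueError); align < 0 is outside the natural domain —
-- A still returns there, but its whole-memory value is an artefact of the chunk loop never running.
def Pre_interesting_regions (mem : List Int) (addr : Int) (fill : List Int) (align : Int) : Prop :=
  fill ≠ [] ∧ 1 ≤ align
instance (mem : List Int) (addr : Int) (fill : List Int) (align : Int) : Decidable (Pre_interesting_regions mem addr fill align) := by unfold Pre_interesting_regions; infer_instance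

def pvWitness_interesting_regions : List Int × Int × List Int × Int := ([1, 2, 0, 0, 3], 10, [0], 2)

def Spec_interesting_regions (mem : List Int) (addr : Int) (fill : List Int) (align : Int) (out : List (Int × List Int)) : Prop := out = interesting_regions_alt mem addr fill align
instance (mem : List Int) (addr : Int) (fill : List Int) (align : Int) (out : List (Int × List Int)) : Decidable (Spec_interesting_regions mem addr fill align out) := by unfold Spec_interesting_regions; infer_instance

-- ===== CLAIM (what is proved, stated in full; the proofs are below) =====
def Claim_equal_interesting_regions : Prop := ∀ (mem : List Int) (addr : Int) (fill : List Int) (align : Int), Dom_interesting_regions mem addr fill align → Pre_interesting_regions mem addr fill align → Spec_interesting_regions mem addr fill align (interesting_regions mem addr fill align)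

-- ===== LEMMAS AND PROOFS =====

-- the slice of mem at chunk k is the boring pattern (a = align.toNat)
def irFlag (mem boring : List Int) (a : Nat) (k : Nat) : Bool :=
  decide (PySem.List.slice mem (some ((a * k : Nat) : Int)) (some ((a * k + a : Nat) : Int)) = boring)

-- reference function: pending non-boring run starts at chunk p, next chunk to examine is j
def irRef (mem : List Int) (addr : Int) (a : Nat) : Nat → Nat → List Bool → List (Int × List Int)
  | p, j, [] => if (a * p : Nat) < mem.length then [(addr + (a * p : Nat), mem.drop (a * p))] else []
  | p, j, true :: rest =>
      (if p < j then [(addr + (a * p : Nat), (mem.drop (a * p)).take (a * j - a * p))] else [])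
        ++ irRef mem addr a (j + 1) (j + 1) rest
  | p, j, false :: rest => irRef mem addr a p (j + 1) rest

theorem flat_take (fill : List Int) (n k k' : Nat) (h : n ≤ k * fill.length) (hk : k ≤ k') :
    ((List.replicate k' fill).flatten).take n = ((List.replicate k fill).flatten).take n := by
  obtain ⟨d, rfl⟩ := Nat.exists_eq_add_of_le hk
  rw [List.replicate_add, List.flatten_append, List.take_append]
  have hlen : ((List.replicate k fill).flatten).length = k * fill.length := by simp
  rw [hlen, Nat.sub_eq_zero_of_le h]
  simp

theorem flat_succ (fill : List Int) (k : Nat) :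
    (List.replicate k fill).flatten ++ fill = (List.replicate (k + 1) fill).flatten := by
  rw [List.replicate_add, List.flatten_append]
  simp

theorem boring_eq (fill : List Int) (align : Int) (hf : fill ≠ []) (ha : 1 ≤ align) :
    boring_region fill align
      = PySem.List.slice (pyListMul fill (PySem.Int.floordiv align (fill.length : Int) + 1)) none (some align) := by
  obtain ⟨a, rfl⟩ : ∃ a : Nat, align = (a : Int) := ⟨align.toNat, (Int.toNat_of_nonneg (by omega)).symm⟩
  have ha' : 1 ≤ a := by exact_mod_cast ha
  have hf' : 1 ≤ fill.length := List.length_pos_iff.mpr hf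
  set f := fill.length with hfdef
  set q := a / f with hq
  have hqf : q * f ≤ a := Nat.div_mul_le_self a f
  have hmod := Nat.div_add_mod a f
  have hmlt : a % f < f := Nat.mod_lt a (by omega)
  have hlen0 : ((List.replicate q fill).flatten).length = q * f := by simp [hfdef, Nat.mul_comm]
  rw [PySem.List.slice_to _ (by positivity), boring_region]
  have hcast1 : ∀ w : Nat, ((w : Int) + 1).toNat = w + 1 := fun w => by omega
  simp only [pyListMul, Int.toNat_natCast, PySem.Int.floordiv_natCast, hcast1, ← hfdef, ← hq]
  by_cases hcase : q * f < a
  · have hlt : (((List.replicate q fill).flatten).length : Int) < ((a : Nat) : Int) := by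
      rw [hlen0]; exact_mod_cast hcase
    rw [if_pos hlt, flat_succ]
    have hq1 : q + 1 ≤ a := by
      have : q ≤ q * f := Nat.le_mul_of_pos_right q (by omega)
      omega
    have hbig : a < (q + 1) * f := by nlinarith [hmod]
    have hlen1 : ((List.replicate (q + 1) fill).flatten).length = (q + 1) * f := by
      simp [hfdef, Nat.mul_comm]
    have hgt : (((List.replicate (q + 1) fill).flatten).length : Int) > ((a : Nat) : Int) := by
      rw [hlen1]; exact_mod_cast hbig
    rw [if_pos hgt, PySem.List.slice_to _ (by positivity), Int.toNat_natCast]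
  · have heq : q * f = a := by omega
    have hlt : ¬ (((List.replicate q fill).flatten).length : Int) < ((a : Nat) : Int) := by
      rw [hlen0]; exact_mod_cast hcase
    rw [if_neg hlt]
    have hgt : ¬ (((List.replicate q fill).flatten).length : Int) > ((a : Nat) : Int) := by
      rw [hlen0]; exact_mod_cast (show ¬ a < q * f by omega)
    rw [if_neg hgt, flat_take fill a q (q + 1) (by rw [← hfdef]; omega) (by omega)]
    exact (List.take_of_length_le (by omega)).symm

theorem irRef_false_run (mem : List Int) (addr : Int) (a : Nat) (k p j : Nat) (rest : List Bool) :
    irRef mem addr a p j (List.replicate k false ++ rest) = irRef mem addr a p (j + k) rest := by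
  induction k generalizing j with
  | zero => simp
  | succ k ih => simp [List.replicate_succ, irRef, ih]; ring_nf

def aStep (mem : List Int) (addr : Int) (boring : List Int) (a : Int) :
    (Int × List (Int × List Int)) → Int → (Int × List (Int × List Int)) :=
  fun st idx =>
    if PySem.List.slice mem (some idx) (some (idx + a)) = boring then
      (idx + a,
       if st.1 < idx then st.2 ++ [(addr + st.1, PySem.List.slice mem (some st.1) (some idx))] else st.2)
    else st

def aFin (mem : List Int) (addr : Int) (boring : List Int) (a : Int)
    (st0 : Int × List (Int × List Int)) (l : List Int) : List (Int × List Int) :=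
  let st := l.foldl (aStep mem addr boring a) st0
  if st.1 < (mem.length : Int) then st.2 ++ [(addr + st.1, PySem.List.slice mem (some st.1) none)] else st.2

theorem aFin_cons (mem : List Int) (addr : Int) (boring : List Int) (a : Int)
    (st0 : Int × List (Int × List Int)) (x : Int) (l : List Int) :
    aFin mem addr boring a st0 (x :: l) = aFin mem addr boring a (aStep mem addr boring a st0 x) l := rfl

theorem main_A (mem : List Int) (addr : Int) (boring : List Int) (a : Nat) (ha : 1 ≤ a) :
    ∀ (c j p : Nat) (acc : List (Int × List Int)), p ≤ j →
    aFin mem addr boring (a : Int) (((a * p : Nat) : Int), acc)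
        ((List.range' j c).map (fun k => ((a * k : Nat) : Int)))
    = acc ++ irRef mem addr a p j ((List.range' j c).map (irFlag mem boring a)) := by
  intro c
  induction c with
  | zero =>
    intro j p acc hpj
    simp only [List.range', List.map_nil, List.foldl_nil, irRef, aFin]
    rw [PySem.List.slice_from _ (by positivity), Int.toNat_natCast]
    by_cases h : a * p < mem.length
    · rw [if_pos (by exact_mod_cast h), if_pos h]
    · rw [if_neg (by exact_mod_cast h), if_neg h, List.append_nil]
  | succ c ih =>
    intro j p acc hpj
    rw [List.range'_succ]
    simp only [List.map_cons, aFin_cons, aStep]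
    have hcast : ((a * j : Nat) : Int) + (a : Int) = ((a * j + a : Nat) : Int) := by push_cast; ring
    rw [hcast]
    by_cases hb : PySem.List.slice mem (some ((a * j : Nat) : Int)) (some ((a * j + a : Nat) : Int)) = boring
    · rw [if_pos hb]
      have hflag : irFlag mem boring a j = true := by simp only [irFlag]; exact decide_eq_true hb
      have hstart : ((a * j + a : Nat) : Int) = ((a * (j + 1) : Nat) : Int) := by push_cast; ring
      rw [hstart, hflag]
      by_cases hpj' : p < j
      · have hlt : (((a * p : Nat) : Int)) < ((a * j : Nat) : Int) := by
          push_cast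
          exact mul_lt_mul_of_pos_left (by exact_mod_cast hpj') (by positivity)
        rw [if_pos hlt]
        rw [ih (j + 1) (j + 1) _ le_rfl]
        simp only [irRef, if_pos hpj', PySem.List.slice_natCast, List.append_assoc,
          List.singleton_append, List.cons_append, List.nil_append]
      · have hpj'' : p = j := by omega
        have hnc : ¬ (((a * p : Nat) : Int) < ((a * j : Nat) : Int)) := by
          rw [hpj'']; exact lt_irrefl _
        rw [if_neg hnc]
        rw [ih (j + 1) (j + 1) _ le_rfl]
        simp only [irRef, if_neg hpj', List.nil_append]
    · rw [if_neg hb]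
      have hflag : irFlag mem boring a j = false := by simp only [irFlag]; exact decide_eq_false hb
      rw [hflag, ih (j + 1) p _ (by omega)]
      simp only [irRef]

theorem main_B (mem : List Int) (addr : Int) (boring : List Int) (a : Nat) (mTot : Nat)
    (ha : 1 ≤ a) (hm : mem.length ≤ a * mTot) (hm2 : ∀ t, t < mTot → a * t < mem.length) :
    ∀ (c j : Nat), j + c = mTot →
    irScan mem addr (a : Int) ((List.range' j c).map (irFlag mem boring a)) (j : Int)
      = irRef mem addr a j j ((List.range' j c).map (irFlag mem boring a)) := by
  intro c
  induction c using Nat.strong_induction_on with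
  | _ c ih =>
  intro j hjc
  match c with
  | 0 =>
    have hjm : j = mTot := by omega
    subst hjm
    simp only [List.range', List.map_nil, irScan, irRef]
    rw [if_neg (by omega)]
  | Nat.succ c' =>
    rw [List.range'_succ, List.map_cons]
    have hj : j < mTot := by omega
    cases hFj : irFlag mem boring a j with
    | true =>
      simp only [irScan, irRef, lt_irrefl, if_neg, List.nil_append]
      have hc : (j : Int) + 1 = ((j + 1 : Nat) : Int) := by push_cast; ring
      rw [hc, ih c' (by omega) (j + 1) (by omega)]
      simp
    | false =>
      -- split the remaining flags at the end of the leading false-run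
      set rest := (List.range' (j + 1) c').map (irFlag mem boring a) with hrest
      have hlrest : rest.length = c' := by simp [hrest]
      obtain ⟨r, hr⟩ : ∃ r, (rest.takeWhile (· = false)).length = r := ⟨_, rfl⟩
      have hrc : r ≤ c' := by
        rw [← hr, ← hlrest]; exact (List.takeWhile_sublist _).length_le
      have htake : rest.takeWhile (· = false) = List.replicate r false := by
        rw [List.eq_replicate_iff]
        exact ⟨hr, fun b hb => by simpa using List.mem_takeWhile_imp hb⟩
      have hdropWhile : rest.drop r = rest.dropWhile (· = false) := by
        conv_lhs => rw [← List.takeWhile_append_dropWhile (p := (· = false)) (l := rest)]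
        rw [htake]
        exact List.drop_left' (by simp)
      have hc' : c' = r + (c' - r) := by omega
      have hsplitRange : List.range' (j + 1) c' = List.range' (j + 1) r ++ List.range' (j + 1 + r) (c' - r) := by
        have h2 := List.range'_append (s := j + 1) (m := r) (n := c' - r) (step := 1)
        rw [Nat.one_mul] at h2
        calc List.range' (j + 1) c' = List.range' (j + 1) (r + (c' - r)) := by rw [← hc']
        _ = _ := h2.symm
      have hdrop : rest.drop r = (List.range' (j + 1 + r) (c' - r)).map (irFlag mem boring a) := by
        rw [hrest, hsplitRange, List.map_append]
        exact List.drop_left' (by simp)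
      have hsplit : rest = List.replicate r false ++ rest.drop r := by
        rw [hdropWhile, ← htake, List.takeWhile_append_dropWhile]
      -- one unfolding of each side at the false head
      simp only [irScan, irRef]
      rw [hr]
      conv_rhs => rw [hsplit, irRef_false_run]
      have hjla : (j : Int) * (a : Int) = ((a * j : Nat) : Int) := by push_cast; ring
      rcases Nat.lt_or_ge r c' with hrlt | hre
      · -- the run stops at a boring chunk inside the flag list
        have hconsR : rest.drop r
            = irFlag mem boring a (j + 1 + r) :: (List.range' (j + 2 + r) (c' - r - 1)).map (irFlag mem boring a) := by
          rw [hdrop]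
          have h5 : c' - r = (c' - r - 1) + 1 := by omega
          rw [h5, List.range'_succ, List.map_cons]
          congr 3
          omega
        have hFtrue : irFlag mem boring a (j + 1 + r) = true := by
          cases hcd : rest.dropWhile (fun x => decide (x = false)) with
          | nil =>
            rw [← hdropWhile] at hcd
            rw [hcd] at hconsR
            exact absurd hconsR (by simp)
          | cons b t =>
            have h6 := List.head?_dropWhile_not (fun x => decide (x = false)) rest
            rw [hcd] at h6
            simp only [List.head?_cons] at h6
            have hbtrue : b = true := by simpa using h6
            rw [← hdropWhile] at hcd
            rw [hcd] at hconsR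
            obtain ⟨hb, -⟩ := List.cons_eq_cons.mp hconsR
            rw [← hb, hbtrue]
        rw [hFtrue] at hconsR
        rw [hconsR]
        simp only [irScan, irRef]
        rw [if_pos (by omega)]
        have hc2 : (j : Int) + 1 + ((r : Nat) : Int) + 1 = ((j + 2 + r : Nat) : Int) := by push_cast; ring
        rw [hc2, ih (c' - r - 1) (by omega) (j + 2 + r) (by omega)]
        simp only [List.cons_append, List.nil_append]
        congr 2
        · rw [hjla]
        · have hb2 : ((j : Int) + 1 + ((r : Nat) : Int)) * (a : Int) = ((a * (j + 1 + r) : Nat) : Int) := by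
            push_cast; ring
          rw [hjla, hb2, PySem.List.slice_natCast]
        all_goals omega
      · -- the run reaches the end of the memory
        have hrc' : r = c' := by omega
        have hnil : rest.drop r = [] := by rw [hdrop, hrc']; simp
        rw [hnil]
        simp only [irScan, irRef]
        rw [if_pos (hm2 j hj)]
        have hmt : j + 1 + r = mTot := by omega
        congr 2
        · rw [hjla]
        · have hb2 : ((j : Int) + 1 + ((r : Nat) : Int)) * (a : Int) = ((a * mTot : Nat) : Int) := by
            rw [← hmt]; push_cast; ring
          rw [hjla, hb2, PySem.List.slice_natCast]
          apply List.take_of_length_le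
          simp
          omega

-- ===== VERDICT (by name: the statement is the Claim_ definition above) =====
theorem interesting_regions_spec : Claim_equal_interesting_regions := by
  intro mem addr fill align _ hPre
  obtain ⟨hf, ha⟩ := hPre
  unfold Spec_interesting_regions
  obtain ⟨a, rfl⟩ : ∃ a : Nat, align = (a : Int) := ⟨align.toNat, (Int.toNat_of_nonneg (by omega)).symm⟩
  have ha' : 1 ≤ a := by exact_mod_cast ha
  have hb := boring_eq fill (a : Int) hf ha
  by_cases hn : (0 : Int) < (mem.length : Int)
  · obtain ⟨mTot, hmdef⟩ : ∃ m, ((((mem.length : Int) - 0 + (a : Int) - 1) / (a : Int))).toNat = m := ⟨_, rfl⟩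
    have hdnn : (0 : Int) ≤ (mem.length : Int) - 0 + (a : Int) - 1 := by push_cast; omega
    have hqnn : (0 : Int) ≤ ((mem.length : Int) - 0 + (a : Int) - 1) / (a : Int) :=
      Int.ediv_nonneg hdnn (by positivity)
    have hmint : (mTot : Int) = ((mem.length : Int) - 0 + (a : Int) - 1) / (a : Int) := by
      rw [← hmdef, Int.toNat_of_nonneg hqnn]
    have hdiv := Int.ediv_add_emod ((mem.length : Int) - 0 + (a : Int) - 1) (a : Int)
    have hmodnn := Int.emod_nonneg ((mem.length : Int) - 0 + (a : Int) - 1) (show (a : Int) ≠ 0 by positivity)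
    have hmodlt := Int.emod_lt_of_pos ((mem.length : Int) - 0 + (a : Int) - 1) (show (0 : Int) < (a : Int) by positivity)
    have hub : mem.length ≤ a * mTot := by
      have : (mem.length : Int) ≤ (a : Int) * (mTot : Int) := by rw [hmint]; omega
      exact_mod_cast this
    have hlb : ∀ t, t < mTot → a * t < mem.length := by
      intro t ht
      have ht' : (t : Int) ≤ (mTot : Int) - 1 := by push_cast; omega
      have h1 : (a : Int) * ((mTot : Int) - 1) < (mem.length : Int) := by rw [hmint]; nlinarith [hmint]
      have : (a : Int) * (t : Int) < (mem.length : Int) := by nlinarith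
      exact_mod_cast this
    have hrange : PySem.List.pyRange 0 (mem.length : Int) (a : Int)
        = (List.range' 0 mTot).map (fun k => ((a * k : Nat) : Int)) := by
      rw [PySem.List.pyRange_of_pos _ _ (by positivity), if_pos hn, hmdef, ← List.range_eq_range']
      apply List.map_congr_left
      intro k _
      push_cast
      ring
    have hA : interesting_regions mem addr fill (a : Int)
        = aFin mem addr (boring_region fill (a : Int)) (a : Int) (0, []) (PySem.List.pyRange 0 (mem.length : Int) (a : Int)) := rfl
    have hmain := main_A mem addr (PySem.List.slice (pyListMul fill (PySem.Int.floordiv (a : Int) (fill.length : Int) + 1)) none (some (a : Int))) a ha' mTot 0 0 [] le_rfl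
    have hB : interesting_regions_alt mem addr fill (a : Int)
        = irScan mem addr (a : Int) ((List.range' 0 mTot).map (irFlag mem (PySem.List.slice (pyListMul fill (PySem.Int.floordiv (a : Int) (fill.length : Int) + 1)) none (some (a : Int))) a)) ((0 : Nat) : Int) := by
      simp only [interesting_regions_alt, hrange, List.map_map]
      congr 1
    rw [hA, hb, hrange, hB, main_B mem addr _ a mTot ha' hub hlb mTot 0 (by omega)]
    simpa using hmain
  · have hlen : mem.length = 0 := by omega
    obtain rfl : mem = [] := List.length_eq_zero_iff.mp hlen
    have hrange0 : PySem.List.pyRange 0 ((0 : Nat) : Int) (a : Int) = [] := by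
      rw [PySem.List.pyRange_of_pos _ _ (by positivity)]
      simp
    simp only [interesting_regions, interesting_regions_alt, List.length_nil, Nat.cast_zero] at *
    rw [hrange0]
    simp [irScan]
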